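-- pv_equiv track=rewrite | github.com/arambarnett/video-editor | transcriber1.py | style_transcript_fast
-- ===== SOURCE A (Python) =====
-- def style_transcript_fast(transcript):
--     # Add quick cuts and energetic transitions
--     words = transcript.split()
--     styled = []
--     for i, word in enumerate(words):
--         if i % 5 == 0:
--             styled.append(f"[CUT] {word.upper()}")
--         else:
--             styled.append(word)
--     return " ".join(styled)
-- ===== SOURCE B (Python) =====
-- def style_transcript_fast(transcript):
--     words = transcript.split()
--     out = []
--     while words:
--         out.append("[CUT] " + words[0].upper())
--         out.extend(words[1:5])
--         words = words[5:]
--     return " ".join(out)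
-- ===== Notes on version B (the rewrite author's own statement) =====
-- stated objective: alternative
-- what changed: Replaces the enumerate loop with an i%5 branch per word by a chunk-of-5 loop that marks the head of each chunk and copies the next four words unchanged, with no per-element index test.
import Mathlib
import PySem

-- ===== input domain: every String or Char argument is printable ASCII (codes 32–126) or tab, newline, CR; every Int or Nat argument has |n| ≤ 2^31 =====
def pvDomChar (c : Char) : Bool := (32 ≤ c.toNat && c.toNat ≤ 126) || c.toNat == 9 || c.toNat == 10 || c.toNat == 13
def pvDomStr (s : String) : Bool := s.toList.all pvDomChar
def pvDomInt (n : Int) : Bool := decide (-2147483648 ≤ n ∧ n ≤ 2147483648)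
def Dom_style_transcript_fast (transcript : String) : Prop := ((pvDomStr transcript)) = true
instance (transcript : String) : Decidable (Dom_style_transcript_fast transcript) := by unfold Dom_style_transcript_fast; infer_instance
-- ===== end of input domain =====

-- B replaces A's per-word enumerate loop with its i % 5 test by a chunk-of-5 loop
-- (mark the chunk head, copy the next four words); alternative decomposition, same cost.


-- ===== PORT A =====
def style_transcript_fast (transcript : String) : String :=
  let words := PySem.Str.split₀ transcript
  let styled := (PySem.List.enumerate words 0).foldl
    (fun acc p =>
      if PySem.Int.mod p.1 5 == 0 then acc ++ ["[CUT] " ++ PySem.Str.upper p.2]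
      else acc ++ [p.2]) []
  PySem.Str.join " " styled

-- ===== PORT B =====
-- the while loop of Source B: pop a chunk of 5, mark its head, copy words[1:5], recurse on words[5:]
-- (on a nonempty list, words[1:5] = rest.take 4 and words[5:] = rest.drop 4 — nonneg clamped slices)
def styleChunks : List String → List String
  | [] => []
  | w :: rest => ("[CUT] " ++ PySem.Str.upper w) :: (rest.take 4 ++ styleChunks (rest.drop 4))
termination_by ws => ws.length
decreasing_by simp

def style_transcript_fast_alt (transcript : String) : String :=
  PySem.Str.join " " (styleChunks (PySem.Str.split₀ transcript))

-- ===== PRECONDITION & SPEC =====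
def Spec_style_transcript_fast (transcript : String) (out : String) : Prop := out = style_transcript_fast_alt transcript
instance (transcript : String) (out : String) : Decidable (Spec_style_transcript_fast transcript out) := by unfold Spec_style_transcript_fast; infer_instance

-- ===== CLAIM (what is proved, stated in full; the proofs are below) =====
def Claim_equal_style_transcript_fast : Prop := ∀ (transcript : String), Dom_style_transcript_fast transcript → Spec_style_transcript_fast transcript (style_transcript_fast transcript)

-- ===== LEMMAS AND PROOFS =====

-- A's loop, as a map with a running index
def mapStep (j : Int) : List String → List String
  | [] => []
  | w :: ws =>
    (if PySem.Int.mod j 5 == 0 then "[CUT] " ++ PySem.Str.upper w else w) :: mapStep (j + 1) ws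

theorem foldA (ws : List String) : ∀ (j : Int) (acc : List String),
    (PySem.List.enumerate ws j).foldl
      (fun acc p =>
        if PySem.Int.mod p.1 5 == 0 then acc ++ ["[CUT] " ++ PySem.Str.upper p.2]
        else acc ++ [p.2]) acc = acc ++ mapStep j ws := by
  induction ws with
  | nil => simp [PySem.List.enumerate_nil, mapStep]
  | cons w ws ih =>
    intro j acc
    simp only [PySem.List.enumerate_cons, List.foldl_cons, mapStep]
    split <;> rw [ih] <;> simp

theorem mapStep_shift (ws : List String) : ∀ j : Int, mapStep (j + 5) ws = mapStep j ws := by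
  induction ws with
  | nil => intro j; rfl
  | cons w ws ih =>
    intro j
    have hm : PySem.Int.mod (j + 5) 5 = PySem.Int.mod j 5 := by
      rw [PySem.Int.mod_eq_emod_of_pos (by norm_num),
          PySem.Int.mod_eq_emod_of_pos (by norm_num)]
      omega
    simp only [mapStep, hm]
    have : j + 5 + 1 = j + 1 + 5 := by ring
    rw [this, ih]

theorem mapStep_one (rest : List String) :
    mapStep 1 rest = rest.take 4 ++ mapStep 0 (rest.drop 4) := by
  rcases rest with _ | ⟨a, _ | ⟨b, _ | ⟨c, _ | ⟨d, rs⟩⟩⟩⟩ <;>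
    simp [mapStep, PySem.Int.mod] <;>
    first
      | rfl
      | rw [show (5 : Int) = 0 + 5 by norm_num, mapStep_shift]

theorem mapStep_eq_chunks : ∀ (n : ℕ) (ws : List String), ws.length ≤ n →
    mapStep 0 ws = styleChunks ws := by
  intro n
  induction n with
  | zero =>
    intro ws h; simp at h; subst h
    rw [mapStep, styleChunks]
  | succ n ih =>
    intro ws h
    cases ws with
    | nil => rw [mapStep, styleChunks]
    | cons w rest =>
      rw [styleChunks]
      have h0 : (PySem.Int.mod 0 5 == 0) = true := by decide
      simp only [mapStep, h0, if_true, zero_add, mapStep_one]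
      rw [ih (rest.drop 4) (by simp at h ⊢; omega)]

-- ===== VERDICT (by name: the statement is the Claim_ definition above) =====
theorem style_transcript_fast_spec : Claim_equal_style_transcript_fast := by
  intro t _
  show style_transcript_fast t = style_transcript_fast_alt t
  unfold style_transcript_fast style_transcript_fast_alt
  simp only [foldA, List.nil_append,
    mapStep_eq_chunks (PySem.Str.split₀ t).length (PySem.Str.split₀ t) le_rfl]
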